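-- pv_equiv track=rewrite | github.com/ho-lol/CorpusReader | sejongmakegraph.py | del_slash
-- ===== SOURCE A (Python) =====
-- def del_slash(postag):
--     if len(postag) < 5:
--         return postag
--
--     not_alpha = [0]
--     temp_pos = []
--     for i in range(len(postag)):
--         if not postag[i].isalpha():
--             not_alpha.append(i)
--     not_alpha.append(len(postag))
--     temp_pos.append(postag[not_alpha[0]:not_alpha[1]])
--
--     for i in zip(not_alpha[1:], not_alpha[2:]):
--         if i[0] == i[1]:
--             continue
--         if temp_pos[-1] == postag[i[0] + 1:i[1]]:
--             continue
--         else: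
--             temp_pos.append(postag[i[0] + 1:i[1]])
--
--     return "+".join(temp_pos)
-- ===== SOURCE B (Python) =====
-- def del_slash(postag):
--     if len(postag) < 5:
--         return postag
--     segs = []
--     buf = []
--     for ch in postag:
--         if ch.isalpha():
--             buf.append(ch)
--         else:
--             segs.append(''.join(buf))
--             buf = []
--     segs.append(''.join(buf))
--     out = [segs[0]]
--     for s in segs[1:]:
--         if s != out[-1]:
--             out.append(s)
--     return "+".join(out)
-- ===== Notes on version B (the rewrite author's own statement) =====
-- stated objective: simpler
-- what changed: A builds an explicit list of non-alpha indices and slices the string over zipped index pairs; B does a single character scan that emits a segment at each non-alpha character and then collapses consecutive duplicate segments.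
import Mathlib
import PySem

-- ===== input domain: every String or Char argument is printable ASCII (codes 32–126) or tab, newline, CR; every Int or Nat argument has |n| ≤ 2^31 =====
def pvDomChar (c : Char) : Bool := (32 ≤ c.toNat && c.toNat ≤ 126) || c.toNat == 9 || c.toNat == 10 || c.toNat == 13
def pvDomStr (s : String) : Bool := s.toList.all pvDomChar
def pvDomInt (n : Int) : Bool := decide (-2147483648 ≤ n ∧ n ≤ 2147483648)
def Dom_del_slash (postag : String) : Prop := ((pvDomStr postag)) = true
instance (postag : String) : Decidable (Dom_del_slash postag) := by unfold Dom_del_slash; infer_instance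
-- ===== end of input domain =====

-- B replaces A's index-list construction and zip-over-index-pairs with a single
-- character scan that emits segments, then a consecutive-duplicate collapse (objective: simpler).

-- ===== PORT A =====
def del_slash (postag : String) : String :=
  let l := postag.toList
  if l.length < 5 then postag
  else
    let notAlpha : List Int :=
      (PySem.List.pyRange 0 (l.length : Int) 1).foldl
        (fun acc i => if !PySem.Chars.isalpha (PySem.List.pyGetD l i ' ') then acc ++ [i] else acc)
        [0]
    let notAlpha2 := notAlpha ++ [(l.length : Int)]
    let tempPos : List (List Char) :=
      [PySem.List.slice l (some (PySem.List.pyGetD notAlpha2 0 0)) (some (PySem.List.pyGetD notAlpha2 1 0))]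
    let tempPos2 :=
      ((PySem.List.slice notAlpha2 (some 1) none).zip (PySem.List.slice notAlpha2 (some 2) none)).foldl
        (fun tp i =>
          if i.1 = i.2 then tp
          else if PySem.List.pyGet? tp (-1) = some (PySem.List.slice l (some (i.1 + 1)) (some i.2)) then tp
          else tp ++ [PySem.List.slice l (some (i.1 + 1)) (some i.2)])
        tempPos
    String.ofList (PySem.Chars.join ['+'] tempPos2)

-- ===== PORT B =====
def del_slash_alt (postag : String) : String :=
  let l := postag.toList
  if l.length < 5 then postag
  else
    let sb := l.foldl
      (fun (st : List (List Char) × List Char) ch =>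
        if PySem.Chars.isalpha ch then (st.1, st.2 ++ [ch]) else (st.1 ++ [st.2], []))
      ([], [])
    let segs := sb.1 ++ [sb.2]
    let out := (PySem.List.slice segs (some 1) none).foldl
      (fun out s => if ¬ (some s = PySem.List.pyGet? out (-1)) then out ++ [s] else out)
      [PySem.List.pyGetD segs 0 []]
    String.ofList (PySem.Chars.join ['+'] out)

-- ===== PRECONDITION & SPEC =====
def Spec_del_slash (postag : String) (out : String) : Prop := out = del_slash_alt postag
instance (postag : String) (out : String) : Decidable (Spec_del_slash postag out) := by unfold Spec_del_slash; infer_instance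

-- ===== CLAIM (what is proved, stated in full; the proofs are below) =====
def Claim_equal_del_slash : Prop := ∀ (postag : String), Dom_del_slash postag → Spec_del_slash postag (del_slash postag)

-- ===== LEMMAS AND PROOFS =====

/-- the split predicate: segment boundaries are the non-alphabetic characters -/
def pNA (c : Char) : Bool := !PySem.Chars.isalpha c

/-- (Nat) indices of the non-alphabetic characters of `l`, in increasing order -/
def naIdx : List Char → List Nat
  | [] => []
  | c :: t => (if PySem.Chars.isalpha c then [] else [0]) ++ (naIdx t).map (· + 1)

/-- the slice A takes for an index pair `(a, b)` -/
def segOf (l : List Char) (ab : Nat × Nat) : List Char := (l.drop (ab.1 + 1)).take (ab.2 - (ab.1 + 1))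

/-- the common dedup step: append unless equal to the last appended segment -/
def dstep (tp : List (List Char)) (s : List Char) : List (List Char) :=
  if PySem.List.pyGet? tp (-1) = some s then tp else tp ++ [s]

/-- the common value of both ports on long-enough input (modulo the final join) -/
def target (l : List Char) : List (List Char) :=
  (((naIdx l).zip ((naIdx l).tail ++ [l.length])).map (segOf l)).foldl dstep
    [l.take ((naIdx l).headD l.length)]

lemma naIdx_lt (l : List Char) : ∀ k ∈ naIdx l, k < l.length := by
  induction l with
  | nil => simp [naIdx]
  | cons c t ih =>
    intro k hk
    simp only [naIdx, List.mem_append, List.mem_ite_nil_left, List.mem_map] at hk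
    simp only [List.length_cons]
    rcases hk with ⟨-, h0⟩ | ⟨m, hm, rfl⟩
    · simp at h0; omega
    · have := ih m hm; omega

lemma naIdx_sorted (l : List Char) : (naIdx l).Pairwise (· < ·) := by
  induction l with
  | nil => simp [naIdx]
  | cons c t ih =>
    have h2 : ((naIdx t).map (· + 1)).Pairwise (· < ·) := by
      rw [List.pairwise_map]; exact ih.imp (fun h => by omega)
    by_cases h : PySem.Chars.isalpha c
    · simpa [naIdx, h] using h2
    · simp only [naIdx, h, Bool.false_eq_true, if_false, List.singleton_append,
        List.pairwise_cons]
      exact ⟨fun m hm => by rcases List.mem_map.mp hm with ⟨x, -, rfl⟩; omega, h2⟩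

lemma pairs_lt (m : List Nat) (n : Nat) (hb : ∀ k ∈ m, k < n) (hp : m.Pairwise (· < ·)) :
    ∀ ab ∈ m.zip (m.tail ++ [n]), ab.1 < ab.2 := by
  induction m with
  | nil => simp
  | cons a m' ih =>
    intro ab hab
    cases m' with
    | nil =>
      simp only [List.tail_cons, List.nil_append, List.zip_cons_cons, List.zip_nil_right,
        List.mem_singleton] at hab
      subst hab; exact hb a (by simp)
    | cons b m'' =>
      simp only [List.tail_cons, List.cons_append, List.zip_cons_cons, List.mem_cons] at hab
      rcases hab with rfl | hab
      · exact (List.pairwise_cons.mp hp).1 b (by simp)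
      · exact ih (fun k hk => hb k (List.mem_cons_of_mem _ hk)) (List.pairwise_cons.mp hp).2 ab hab

/-- shifting all index pairs by one while consing a character changes no slice -/
lemma shift_pairs (c : Char) (t : List Char) (m : List Nat) :
    List.map (segOf (c :: t)) ((m.map (· + 1)).zip ((m.map (· + 1)).tail ++ [t.length + 1]))
      = List.map (segOf t) (m.zip (m.tail ++ [t.length])) := by
  rw [← List.map_tail]
  rw [show (m.tail.map (· + 1) ++ [t.length + 1]) = (m.tail ++ [t.length]).map (· + 1) by simp]
  rw [List.zip_map, List.map_map]
  apply List.map_congr_left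
  intro ab _
  simp only [Function.comp_apply, Prod.map, segOf, List.drop_succ_cons]
  congr 1
  omega

/-- splitting on non-alpha characters, expressed through A's index pairs -/
lemma main_split (l : List Char) :
    List.splitOnP pNA l =
      l.take ((naIdx l).headD l.length) ::
        ((naIdx l).zip ((naIdx l).tail ++ [l.length])).map (segOf l) := by
  induction l with
  | nil => simp [naIdx, List.splitOnP_nil]
  | cons c t ih =>
    by_cases h : PySem.Chars.isalpha c
    · -- alpha: c joins the first segment
      rw [List.splitOnP_cons]
      simp only [pNA, h, Bool.not_true, Bool.false_eq_true, if_false, ih,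
        List.modifyHead_cons]
      simp only [naIdx, h, if_true, List.nil_append, List.length_cons]
      have hh : ((naIdx t).map (· + 1)).headD (t.length + 1) = (naIdx t).headD t.length + 1 := by
        cases naIdx t <;> simp
      rw [hh, List.take_succ_cons, shift_pairs]
    · -- non-alpha: a new empty segment starts
      rw [List.splitOnP_cons]
      simp only [pNA, h, Bool.not_false, if_true, ih]
      simp only [naIdx, h, Bool.false_eq_true, if_false, List.singleton_append,
        List.headD_cons, List.take_zero, List.length_cons, List.tail_cons]
      congr 1
      cases hm : naIdx t with
      | nil =>
        simp [segOf, List.take_length]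
      | cons a m' =>
        simp only [List.map_cons, List.cons_append, List.zip_cons_cons, List.headD_cons,
          List.tail_cons]
        have h1 : segOf (c :: t) (0, a + 1) = t.take a := by simp [segOf]
        rw [h1]
        congr 1
        have h2 := shift_pairs c t (a :: m')
        simp only [List.map_cons, List.tail_cons] at h2
        exact h2.symm

/-- B's scan builds exactly the split-on-non-alpha segment list -/
lemma bscan (l : List Char) (S : List (List Char)) (B : List Char) :
    (l.foldl
      (fun (st : List (List Char) × List Char) ch =>
        if PySem.Chars.isalpha ch then (st.1, st.2 ++ [ch]) else (st.1 ++ [st.2], []))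
      (S, B)).1 ++
      [(l.foldl
        (fun (st : List (List Char) × List Char) ch =>
          if PySem.Chars.isalpha ch then (st.1, st.2 ++ [ch]) else (st.1 ++ [st.2], []))
        (S, B)).2] =
    S ++ List.modifyHead (B ++ ·) (List.splitOnP pNA l) := by
  induction l generalizing S B with
  | nil => simp [List.splitOnP_nil]
  | cons c t ih =>
    by_cases h : PySem.Chars.isalpha c
    · rw [List.foldl_cons, if_pos h, ih, List.splitOnP_cons]
      simp only [pNA, h, Bool.not_true, Bool.false_eq_true, if_false,
        List.modifyHead_modifyHead]
      congr 2
      funext x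
      simp
    · rw [List.foldl_cons, if_neg h, ih, List.splitOnP_cons]
      simp only [pNA, h, Bool.not_false, if_true, List.modifyHead_cons, List.append_assoc,
        List.singleton_append, List.append_nil]
      cases List.splitOnP pNA t <;> simp

/-- the Nat-level filtered index list is naIdx -/
lemma natfilter (l : List Char) :
    (List.range l.length).filter (fun k => !PySem.Chars.isalpha (l.getD k ' ')) = naIdx l := by
  induction l with
  | nil => simp [naIdx]
  | cons c t ih =>
    rw [List.length_cons, List.range_succ_eq_map, List.filter_cons]
    simp only [Nat.succ_eq_add_one, List.filter_map, Function.comp_def, List.getD_cons_succ,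
      List.getD_cons_zero, ih, naIdx]
    by_cases h : PySem.Chars.isalpha c <;> simp [h]

/-- the filtered index list of A, at the Int level -/
lemma intfilter (l : List Char) :
    List.filter (fun x : Nat => !PySem.Chars.isalpha (PySem.List.pyGetD l (↑x) ' '))
      (List.range l.length) = naIdx l := by
  rw [← natfilter]
  apply List.filter_congr
  intro k _
  simp [PySem.List.pyGetD_natCast]

lemma zipshift {β : Type} (M : List β) (x : β) :
    (M ++ [x]).zip ((M ++ [x]).tail) = M.zip (M.tail ++ [x]) := by
  induction M with
  | nil => simp
  | cons a M' ih =>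
    cases M' with
    | nil => simp
    | cons b M'' =>
      simp only [List.cons_append, List.tail_cons, List.zip_cons_cons] at ih ⊢
      rw [ih]

/-- A's result, characterised -/
lemma Aval (postag : String) :
    del_slash postag =
      if postag.toList.length < 5 then postag
      else String.ofList (PySem.Chars.join ['+'] (target postag.toList)) := by
  unfold del_slash
  set l := postag.toList with hl
  by_cases hlen : l.length < 5
  · simp [hlen]
  · simp only [hlen, if_false]
    rw [PySem.List.foldl_append_if (fun i => !PySem.Chars.isalpha (PySem.List.pyGetD l i ' '))
        (fun i => i)]
    rw [PySem.List.pyRange_zero_nat, List.filter_map, List.map_map]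
    simp only [Function.comp_def, intfilter]
    set M := (naIdx l).map (fun x : Nat => (x : Int)) with hM
    have hna2 : ([(0 : Int)] ++ M) ++ [(l.length : Int)]
        = 0 :: (M ++ [(l.length : Int)]) := by simp
    rw [hna2]
    have h0 : PySem.List.pyGetD (0 :: (M ++ [(l.length : Int)])) 0 0 = ((0 : Nat) : Int) := by
      rw [PySem.List.pyGetD_ofNat']; rfl
    have h1 : PySem.List.pyGetD (0 :: (M ++ [(l.length : Int)])) 1 0
        = (((naIdx l).headD l.length : Nat) : Int) := by
      rw [PySem.List.pyGetD_ofNat']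
      cases hm : naIdx l <;> simp [hM, hm]
    rw [h0, h1, PySem.List.slice_natCast]
    rw [PySem.List.slice_from_one, List.tail_cons]
    rw [PySem.List.slice_from (0 :: (M ++ [(l.length : Int)])) (by norm_num : (0:Int) ≤ 2)]
    have hdrop : (0 :: (M ++ [(l.length : Int)])).drop (2 : Int).toNat = (M ++ [(l.length : Int)]).tail := by
      rw [show ((2:Int).toNat) = 2 by rfl, List.drop_succ_cons, List.drop_one]
    rw [hdrop, zipshift]
    have hMt : M.tail ++ [(l.length : Int)]
        = ((naIdx l).tail ++ [l.length]).map (fun x : Nat => (x : Int)) := by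
      simp [hM, ← List.map_tail]
    rw [hMt, hM, List.zip_map, List.foldl_map]
    rw [PySem.List.foldl_congr_mem _ _ (fun tp ab => dstep tp (segOf l ab)) _ ?_]
    · show String.ofList (PySem.Chars.join ['+'] _) = _
      unfold target
      rw [List.foldl_map]
      simp
    · intro acc ab hab
      rcases ab with ⟨a, b⟩
      have hlt : a < b :=
        pairs_lt (naIdx l) l.length (naIdx_lt l) (naIdx_sorted l) ⟨a, b⟩ hab
      simp only [Prod.map]
      rw [if_neg (by simp; omega : ¬((a : Int) = (b : Int)))]
      have hsl : PySem.List.slice l (some ((a : Int) + 1)) (some (b : Int)) = segOf l (a, b) := by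
        rw [show ((a : Int) + 1) = ((a + 1 : Nat) : Int) by push_cast; ring]
        rw [PySem.List.slice_natCast]
        rfl
      rw [hsl]
      rfl

/-- B's result, characterised -/
lemma Bval (postag : String) :
    del_slash_alt postag =
      if postag.toList.length < 5 then postag
      else String.ofList (PySem.Chars.join ['+'] (target postag.toList)) := by
  unfold del_slash_alt
  set l := postag.toList with hl
  by_cases hlen : l.length < 5
  · simp [hlen]
  · simp only [hlen, if_false]
    have hb := bscan l [] []
    simp only [List.nil_append] at hb
    rw [show List.modifyHead (fun x : List Char => x) (List.splitOnP pNA l)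
        = List.splitOnP pNA l by cases List.splitOnP pNA l <;> simp] at hb
    rw [hb, main_split]
    rw [PySem.List.slice_from_one, List.tail_cons]
    rw [PySem.List.pyGetD_ofNat', List.getD_cons_zero]
    have hsteps : (fun (out : List (List Char)) (s : List Char) =>
        if ¬ (some s = PySem.List.pyGet? out (-1)) then out ++ [s] else out) = dstep := by
      funext out s
      unfold dstep
      split_ifs with h1 h2 <;> simp_all
    rw [hsteps]
    rfl

-- ===== VERDICT (by name: the statement is the Claim_ definition above) =====
theorem del_slash_spec : Claim_equal_del_slash := by
  intro postag _
  unfold Spec_del_slash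
  rw [Aval, Bval]
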